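-- pv_equiv track=rewrite | github.com/amjadmajid/aud | AAC/OChirpOldFunctions.py | get_bits_from_peaks
-- ===== SOURCE A (Python) =====
-- def get_bits_from_peaks(peaks: list) -> list:
--     # Mark the respective symbols and merge them in a sorted list
--     peaks_s0 = list(map(lambda x: (x, 0), peaks[0]))
--     peaks_s1 = list(map(lambda x: (x, 1), peaks[1]))
--     symbol_peaks = peaks_s0 + peaks_s1
--     symbol_peaks.sort()
--
--     # Reconstruct the data
--     bits = []
--     for symbol in symbol_peaks:
--         bits.append(symbol[1])
--
--     return bits
-- ===== SOURCE B (Python) =====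
-- def get_bits_from_peaks(peaks: list) -> list:
--     # Merge the two peak lists with two pointers instead of tagging + combined sort.
--     s0 = sorted(peaks[0])
--     s1 = sorted(peaks[1])
--     bits = []
--     i = j = 0
--     while i < len(s0) and j < len(s1):
--         if s0[i] <= s1[j]:
--             bits.append(0)
--             i += 1
--         else:
--             bits.append(1)
--             j += 1
--     bits.extend([0] * (len(s0) - i))
--     bits.extend([1] * (len(s1) - j))
--     return bits
-- ===== Notes on version B (the rewrite author's own statement) =====
-- stated objective: alternative
-- what changed: Replaces tagging every peak, sorting the combined tuple list and projecting out the tags by sorting the two lists separately and merging them with a two-pointer loop that emits 0/1 directly (<= on ties reproduces the (x,0)-before-(x,1) tuple order).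
import Mathlib
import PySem

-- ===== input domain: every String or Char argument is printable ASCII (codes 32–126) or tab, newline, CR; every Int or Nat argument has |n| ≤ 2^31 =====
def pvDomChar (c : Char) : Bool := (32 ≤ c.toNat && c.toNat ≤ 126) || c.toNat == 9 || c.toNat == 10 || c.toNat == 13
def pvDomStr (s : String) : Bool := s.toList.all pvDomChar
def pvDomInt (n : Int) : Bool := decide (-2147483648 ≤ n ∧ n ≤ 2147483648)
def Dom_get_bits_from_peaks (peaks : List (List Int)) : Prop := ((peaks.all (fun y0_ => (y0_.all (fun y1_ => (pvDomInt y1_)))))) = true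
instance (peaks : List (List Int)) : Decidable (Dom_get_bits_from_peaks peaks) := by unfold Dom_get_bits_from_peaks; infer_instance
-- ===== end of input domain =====

-- B replaces tag-combine-sort-project with sort-each-then-two-pointer-merge; alternative decomposition, same result.


-- ===== PORT A =====
def get_bits_from_peaks (peaks : List (List Int)) : List Int :=
  match PySem.List.pyGet? peaks 0 with
  | none => []            -- IndexError: excluded by Pre_
  | some l0 =>
    match PySem.List.pyGet? peaks 1 with
    | none => []          -- IndexError: excluded by Pre_
    | some l1 =>
      let peaks_s0 := l0.map (fun x => (x, (0 : Int)))
      let peaks_s1 := l1.map (fun x => (x, (1 : Int)))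
      let symbol_peaks := PySem.List.sorted2 (peaks_s0 ++ peaks_s1) (fun p => p.1) (fun p => p.2)
      symbol_peaks.foldl (fun bits symbol => bits ++ [symbol.2]) []

-- ===== PORT B =====
-- two-pointer merge of two ascending lists, emitting the source tag of each element
def pvMergeBits : List Int → List Int → List Int
  | [], s1 => List.replicate s1.length 1
  | x :: xs, [] => List.replicate (x :: xs).length 0
  | x :: xs, y :: ys =>
    if x ≤ y then 0 :: pvMergeBits xs (y :: ys)
    else 1 :: pvMergeBits (x :: xs) ys

def get_bits_from_peaks_alt (peaks : List (List Int)) : List Int :=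
  match PySem.List.pyGet? peaks 0 with
  | none => []            -- IndexError: excluded by Pre_
  | some l0 =>
    match PySem.List.pyGet? peaks 1 with
    | none => []          -- IndexError: excluded by Pre_
    | some l1 =>
      pvMergeBits (PySem.List.sorted l0 (fun x => x)) (PySem.List.sorted l1 (fun x => x))

-- ===== PRECONDITION & SPEC =====
-- Pre_ excludes only peaks with fewer than two inner lists, where A raises IndexError on peaks[0]/peaks[1].
def Pre_get_bits_from_peaks (peaks : List (List Int)) : Prop := 2 ≤ peaks.length
instance (peaks : List (List Int)) : Decidable (Pre_get_bits_from_peaks peaks) := by unfold Pre_get_bits_from_peaks; infer_instance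
def pvWitness_get_bits_from_peaks : List (List Int) := [[3, 1, 3], [2, 3]]

def Spec_get_bits_from_peaks (peaks : List (List Int)) (out : List Int) : Prop := out = get_bits_from_peaks_alt peaks
instance (peaks : List (List Int)) (out : List Int) : Decidable (Spec_get_bits_from_peaks peaks out) := by unfold Spec_get_bits_from_peaks; infer_instance

-- ===== CLAIM (what is proved, stated in full; the proofs are below) =====
def Claim_equal_get_bits_from_peaks : Prop := ∀ (peaks : List (List Int)), Dom_get_bits_from_peaks peaks → Pre_get_bits_from_peaks peaks → Spec_get_bits_from_peaks peaks (get_bits_from_peaks peaks)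

-- ===== LEMMAS AND PROOFS =====

-- lexicographic ≤ on tagged peaks: Python's tuple order
def pvLexLe (a b : Int × Int) : Prop := a.1 < b.1 ∨ (a.1 = b.1 ∧ a.2 ≤ b.2)

-- the Boolean lex-before predicate sorted2 uses
def pvBefore (a b : Int × Int) : Bool :=
  decide (a.1 < b.1) || (!decide (b.1 < a.1) && decide (a.2 < b.2))

-- proof-side twin of pvMergeBits that keeps the tags paired with the values
def pvMergeTag : List Int → List Int → List (Int × Int)
  | [], s1 => s1.map (fun y => (y, 1))
  | x :: xs, [] => (x :: xs).map (fun x => (x, 0))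
  | x :: xs, y :: ys =>
    if x ≤ y then (x, 0) :: pvMergeTag xs (y :: ys)
    else (y, 1) :: pvMergeTag (x :: xs) ys

theorem pvMergeBits_eq_map_snd (s0 s1 : List Int) :
    pvMergeBits s0 s1 = (pvMergeTag s0 s1).map (fun p => p.2) := by
  induction s0, s1 using pvMergeTag.induct with
  | case1 s1 => simp [pvMergeBits, pvMergeTag, Function.comp_def, List.map_const']
  | case2 x xs => simp [pvMergeBits, pvMergeTag, Function.comp_def, List.map_const', List.replicate_succ]
  | case3 x xs y ys h ih => simp [pvMergeBits, pvMergeTag, h, ih]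
  | case4 x xs y ys h ih => simp [pvMergeBits, pvMergeTag, h, ih]

theorem pvMergeTag_perm (s0 s1 : List Int) :
    (pvMergeTag s0 s1).Perm
      (s0.map (fun x => (x, (0 : Int))) ++ s1.map (fun x => (x, (1 : Int)))) := by
  induction s0, s1 using pvMergeTag.induct with
  | case1 s1 => simp [pvMergeTag]
  | case2 x xs => simp [pvMergeTag]
  | case3 x xs y ys h ih => simpa [pvMergeTag, h] using ih.cons (x, 0)
  | case4 x xs y ys h ih =>
    simp only [pvMergeTag, h, ite_false]
    exact (ih.cons (y, 1)).trans List.perm_middle.symm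

theorem mem_pvMergeTag {z : Int × Int} {s0 s1 : List Int} (hz : z ∈ pvMergeTag s0 s1) :
    (z.2 = 0 ∧ z.1 ∈ s0) ∨ (z.2 = 1 ∧ z.1 ∈ s1) := by
  have := (pvMergeTag_perm s0 s1).mem_iff.mp hz
  rcases List.mem_append.mp this with h | h
  · obtain ⟨x, hx, rfl⟩ := List.mem_map.mp h; exact Or.inl ⟨rfl, hx⟩
  · obtain ⟨x, hx, rfl⟩ := List.mem_map.mp h; exact Or.inr ⟨rfl, hx⟩

theorem pvMergeTag_pairwise (s0 s1 : List Int)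
    (h0 : s0.Pairwise (· ≤ ·)) (h1 : s1.Pairwise (· ≤ ·)) :
    (pvMergeTag s0 s1).Pairwise pvLexLe := by
  induction s0, s1 using pvMergeTag.induct with
  | case1 s1 =>
    simpa [pvMergeTag] using h1.map (fun y => (y, (1 : Int)))
      (fun a b hab => by simp only [pvLexLe]; omega)
  | case2 x xs =>
    simpa [pvMergeTag] using h0.map (fun y => (y, (0 : Int)))
      (fun a b hab => by simp only [pvLexLe]; omega)
  | case3 x xs y ys h ih =>
    rw [List.pairwise_cons] at h0
    simp only [pvMergeTag, h, if_pos, List.pairwise_cons]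
    refine ⟨fun z hz => ?_, ih h0.2 h1⟩
    rcases mem_pvMergeTag hz with ⟨ht, hm⟩ | ⟨ht, hm⟩
    · have := h0.1 _ hm; simp only [pvLexLe, ht]; omega
    · have hy : y ≤ z.1 := by
        rcases List.mem_cons.mp hm with rfl | hm'
        · exact le_refl _
        · exact (List.pairwise_cons.mp h1).1 _ hm'
      simp only [pvLexLe, ht]; omega
  | case4 x xs y ys h ih =>
    rw [List.pairwise_cons] at h1
    simp only [pvMergeTag, h, ite_false, List.pairwise_cons]
    refine ⟨fun z hz => ?_, ih h0 h1.2⟩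
    rcases mem_pvMergeTag hz with ⟨ht, hm⟩ | ⟨ht, hm⟩
    · have hx : x ≤ z.1 := by
        rcases List.mem_cons.mp hm with rfl | hm'
        · exact le_refl _
        · exact (List.pairwise_cons.mp h0).1 _ hm'
      simp only [pvLexLe, ht]; omega
    · have := h1.1 _ hm; simp only [pvLexLe, ht]; omega

theorem pvInsertBy_pairwise (x : Int × Int) (ys : List (Int × Int))
    (h : ys.Pairwise pvLexLe) :
    (PySem.List.insertBy pvBefore x ys).Pairwise pvLexLe := by
  induction ys with
  | nil => simp [PySem.List.insertBy]
  | cons y ys ih =>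
    rw [List.pairwise_cons] at h
    by_cases hb : pvBefore x y = true
    · rw [show PySem.List.insertBy pvBefore x (y :: ys) = x :: y :: ys from by
        simp [PySem.List.insertBy, hb], List.pairwise_cons, List.pairwise_cons]
      have hxy : pvLexLe x y := by
        simp only [pvBefore, Bool.or_eq_true, Bool.and_eq_true, Bool.not_eq_true',
          decide_eq_true_eq, decide_eq_false_iff_not] at hb
        simp only [pvLexLe]; omega
      refine ⟨fun z hz => ?_, h.1, h.2⟩
      rcases List.mem_cons.mp hz with rfl | hz'
      · exact hxy
      · have := h.1 _ hz'
        simp only [pvLexLe] at hxy this ⊢; omega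
    · rw [show PySem.List.insertBy pvBefore x (y :: ys) = y :: PySem.List.insertBy pvBefore x ys from by
        simp [PySem.List.insertBy, hb], List.pairwise_cons]
      have hyx : pvLexLe y x := by
        simp only [pvBefore, Bool.or_eq_true, Bool.and_eq_true, Bool.not_eq_true',
          decide_eq_true_eq, decide_eq_false_iff_not, not_or, not_and] at hb
        simp only [pvLexLe]; omega
      refine ⟨fun z hz => ?_, ih h.2⟩
      rw [PySem.List.mem_insertBy] at hz
      rcases hz with rfl | hz'
      · exact hyx
      · exact h.1 _ hz'

theorem pvSorted2_eq_foldl (xs : List (Int × Int)) :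
    PySem.List.sorted2 xs (fun p => p.1) (fun p => p.2) false
      = xs.foldl (fun acc x => PySem.List.insertBy pvBefore x acc) [] := rfl

theorem pvFoldl_insertBy_pairwise (xs acc : List (Int × Int))
    (h : acc.Pairwise pvLexLe) :
    (xs.foldl (fun acc x => PySem.List.insertBy pvBefore x acc) acc).Pairwise pvLexLe := by
  induction xs generalizing acc with
  | nil => exact h
  | cons x xs ih => exact ih _ (pvInsertBy_pairwise x acc h)

theorem pvSorted2_eq_mergeTag (l0 l1 : List Int) :
    PySem.List.sorted2 (l0.map (fun x => (x, (0 : Int))) ++ l1.map (fun x => (x, (1 : Int))))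
        (fun p => p.1) (fun p => p.2) false
      = pvMergeTag (PySem.List.sorted l0 (fun x => x)) (PySem.List.sorted l1 (fun x => x)) := by
  set xs := l0.map (fun x => (x, (0 : Int))) ++ l1.map (fun x => (x, (1 : Int))) with hxs
  have hperm1 : (PySem.List.sorted2 xs (fun p => p.1) (fun p => p.2) false).Perm xs :=
    PySem.List.sorted2_perm xs _ _ false
  have hperm2 :
      (pvMergeTag (PySem.List.sorted l0 (fun x => x)) (PySem.List.sorted l1 (fun x => x))).Perm xs := by
    refine (pvMergeTag_perm _ _).trans ?_
    exact List.Perm.append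
      ((PySem.List.sorted_perm l0 (fun x => x) false).map _)
      ((PySem.List.sorted_perm l1 (fun x => x) false).map _)
  have hp1 : (PySem.List.sorted2 xs (fun p => p.1) (fun p => p.2) false).Pairwise pvLexLe := by
    rw [pvSorted2_eq_foldl]
    exact pvFoldl_insertBy_pairwise xs [] (List.Pairwise.nil)
  have hp2 :
      (pvMergeTag (PySem.List.sorted l0 (fun x => x)) (PySem.List.sorted l1 (fun x => x))).Pairwise pvLexLe := by
    apply pvMergeTag_pairwise
    · simpa using PySem.List.sorted_pairwise l0 (fun x => x)
    · simpa using PySem.List.sorted_pairwise l1 (fun x => x)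
  exact List.Perm.eq_of_pairwise
    (fun a b _ _ hab hba => by
      simp only [pvLexLe] at hab hba
      exact Prod.ext (by omega) (by omega))
    hp1 hp2 (hperm1.trans hperm2.symm)

-- ===== VERDICT (by name: the statement is the Claim_ definition above) =====
theorem get_bits_from_peaks_spec : Claim_equal_get_bits_from_peaks := by
  intro peaks _ hpre
  unfold Pre_get_bits_from_peaks at hpre
  match peaks, hpre with
  | l0 :: l1 :: rest, _ =>
    show get_bits_from_peaks (l0 :: l1 :: rest) = get_bits_from_peaks_alt (l0 :: l1 :: rest)
    have h0 : PySem.List.pyGet? (l0 :: l1 :: rest) (0 : Int) = some l0 := by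
      simp [PySem.List.pyGet?, PySem.List.pyIdx?]
      rw [if_pos (by positivity : (0:Int) ≤ (rest.length:Int) + 1)]
      simp
    have h1 : PySem.List.pyGet? (l0 :: l1 :: rest) (1 : Int) = some l1 := by
      simp [PySem.List.pyGet?, PySem.List.pyIdx?]
    simp only [get_bits_from_peaks, get_bits_from_peaks_alt, h0, h1]
    rw [PySem.List.foldl_append_singleton_eq_map, pvSorted2_eq_mergeTag,
      pvMergeBits_eq_map_snd]
    simp
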